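-- pv_equiv track=rewrite | github.com/ivyycc/NLP_Project | scripts/leakage_checker.py | check_label_leakage
-- ===== SOURCE A (Python) =====
-- SEP_TOKEN  = 68
--
-- def check_label_leakage(seqs):
--
--     leak_count = 0
--     for seq in seqs:
--         input_seq = seq[:-1]
--         target_seq = seq[1:]
--         # find SEP in input
--         sep_indices = [i for i, t in enumerate(input_seq) if t == SEP_TOKEN]
--         if not sep_indices:
--             continue
--         last_token = target_seq[-1]
--         for idx in sep_indices:
--             if idx + 1 < len(input_seq):
--                 if input_seq[idx + 1] == last_token:
--                     leak_count += 1
--     return leak_count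
-- ===== SOURCE B (Python) =====
-- SEP_TOKEN = 68
--
-- def check_label_leakage(seqs):
--     # Build a bigram histogram (dict) of the input portion per sequence,
--     # then answer with a single lookup of the (SEP, last-target-token) key.
--     total = 0
--     for seq in seqs:
--         if len(seq) < 3:
--             continue
--         inp = seq[:-1]
--         bigrams = {}
--         prev = inp[0]
--         for t in inp[1:]:
--             key = (prev, t)
--             bigrams[key] = bigrams.get(key, 0) + 1
--             prev = t
--         total += bigrams.get((SEP_TOKEN, seq[-1]), 0)
--     return total
-- ===== Notes on version B (the rewrite author's own statement) =====
-- stated objective: alternative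
-- what changed: A builds a list of SEP indices per sequence and then loops over it re-indexing input_seq[idx+1]; B instead builds a bigram histogram (dict keyed by adjacent token pairs) of the input portion and answers with a single lookup of the (SEP, last-target-token) key.
import Mathlib
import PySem

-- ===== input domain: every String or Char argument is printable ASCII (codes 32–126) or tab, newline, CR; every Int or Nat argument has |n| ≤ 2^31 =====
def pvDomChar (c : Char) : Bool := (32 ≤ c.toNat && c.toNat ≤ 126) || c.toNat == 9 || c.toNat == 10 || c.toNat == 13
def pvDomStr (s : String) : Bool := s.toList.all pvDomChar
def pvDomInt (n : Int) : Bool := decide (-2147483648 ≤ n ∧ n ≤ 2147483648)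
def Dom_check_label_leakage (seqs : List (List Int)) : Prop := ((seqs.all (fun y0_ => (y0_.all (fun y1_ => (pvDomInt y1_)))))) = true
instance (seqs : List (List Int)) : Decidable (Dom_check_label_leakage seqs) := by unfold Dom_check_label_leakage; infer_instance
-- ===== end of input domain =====

-- B replaces A's SEP-index-list phase with a per-sequence bigram histogram (dict of adjacent-pair counts) plus one (SEP,last) lookup; objective: alternative (return value only; no mutation).


-- ===== PORT A =====
def check_label_leakage (seqs : List (List Int)) : Int :=
  seqs.foldl (fun leak_count seq =>
    let input_seq := PySem.List.slice seq none (some (-1))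
    let target_seq := PySem.List.slice seq (some 1) none
    let sep_indices := ((PySem.List.enumerate input_seq).filter (fun p => p.2 == 68)).map (·.1)
    if sep_indices.isEmpty then leak_count
    else
      -- target_seq[-1] is in range: sep_indices ≠ [] forces input_seq ≠ [], hence target_seq ≠ []
      let last_token := PySem.List.pyGetD target_seq (-1) 0
      sep_indices.foldl (fun lc idx =>
        if idx + 1 < (input_seq.length : Int) then
          -- input_seq[idx + 1] is in range: the guard just checked idx + 1 < len, and idx ≥ 0
          if PySem.List.pyGetD input_seq (idx + 1) 0 == last_token then lc + 1 else lc
        else lc) leak_count) 0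

-- ===== PORT B =====
def check_label_leakage_alt (seqs : List (List Int)) : Int :=
  seqs.foldl (fun total seq =>
    if seq.length < 3 then total
    else
      let inp := PySem.List.slice seq none (some (-1))
      -- inp[0] is in range (len seq ≥ 3 so len inp ≥ 2); the loop state is (bigrams, prev)
      let st := (PySem.List.slice inp (some 1) none).foldl
          (fun (s : PySem.Dict (Int × Int) Int × Int) t =>
            (s.1.insert (s.2, t) (s.1.getD (s.2, t) 0 + 1), t))
          ((PySem.Dict.empty : PySem.Dict (Int × Int) Int), PySem.List.pyGetD inp 0 0)
      -- seq[-1] is in range: len seq ≥ 3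
      total + st.1.getD (68, PySem.List.pyGetD seq (-1) 0) 0) 0

-- ===== PRECONDITION & SPEC =====
def Spec_check_label_leakage (seqs : List (List Int)) (out : Int) : Prop := out = check_label_leakage_alt seqs
instance (seqs : List (List Int)) (out : Int) : Decidable (Spec_check_label_leakage seqs out) := by unfold Spec_check_label_leakage; infer_instance

-- ===== CLAIM (what is proved, stated in full; the proofs are below) =====
def Claim_equal_check_label_leakage : Prop := ∀ (seqs : List (List Int)), Dom_check_label_leakage seqs → Spec_check_label_leakage seqs (check_label_leakage seqs)

-- ===== LEMMAS AND PROOFS =====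

-- A's inner loop over an index list is the accumulator plus a count over that list.
theorem pv_foldl_nested (X : List Int) (last : Int) :
    ∀ (l : List Int) (a : Int),
      l.foldl (fun lc idx =>
        if idx + 1 < (X.length : Int) then
          if PySem.List.pyGetD X (idx + 1) 0 == last then lc + 1 else lc
        else lc) a
      = a + ((l.countP (fun idx => decide (idx + 1 < (X.length : Int)) &&
              (PySem.List.pyGetD X (idx + 1) 0 == last))) : Int) := by
  intro l
  induction l with
  | nil => intro a; simp
  | cons x xs ih =>
    intro a
    simp only [List.foldl_cons, List.countP_cons, ih]
    by_cases h1 : x + 1 < (X.length : Int)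
    · by_cases h2 : PySem.List.pyGetD X (x + 1) 0 == last
      · simp [h1, h2]; ring
      · simp [h1, h2]
    · simp [h1]

-- The index-based count over enumerate X equals the count over adjacent pairs of X.
theorem pv_key (X : List Int) (last : Int) :
    ∀ (ys : List Int) (s : Nat), X.drop s = ys →
      (PySem.List.enumerate ys (s : Int)).countP
          (fun p => (decide (p.1 + 1 < (X.length : Int)) &&
              (PySem.List.pyGetD X (p.1 + 1) 0 == last)) && (p.2 == 68))
        = (ys.zip ys.tail).countP (fun p => p.1 == 68 && p.2 == last) := by
  intro ys
  induction ys with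
  | nil => intro s _; simp [PySem.List.enumerate_nil]
  | cons y ys' ih =>
    intro s h
    have hs : s < X.length := by
      by_contra hc
      rw [List.drop_eq_nil_of_le (by omega)] at h; simp at h
    have hdrop : X.drop (s + 1) = ys' := by
      rw [← List.tail_drop, h]; rfl
    rw [PySem.List.enumerate_cons]
    cases ys' with
    | nil =>
      have hlen : X.length = s + 1 := by
        have h2 := List.drop_eq_nil_iff.mp hdrop
        omega
      simp [PySem.List.enumerate_nil, hlen]
    | cons z zs =>
      have hlt : s + 1 < X.length := by
        have h2 : (X.drop (s+1)).length = X.length - (s+1) := List.length_drop ..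
        rw [hdrop] at h2; simp at h2; omega
      have hz : PySem.List.pyGetD X ((s : Int) + 1) 0 = z := by
        have h0 : X[s+1]? = some z := by
          have h1 : (X.drop (s+1))[0]? = some z := by rw [hdrop]; rfl
          simpa using h1
        have h3 : PySem.List.pyGetD X (((s+1 : Nat)) : Int) 0 = X.getD (s+1) 0 :=
          PySem.List.pyGetD_natCast ..
        push_cast at h3
        rw [h3, List.getD_eq_getElem?_getD, h0]; rfl
      have ihs := ih (s + 1) hdrop
      push_cast at ihs
      have hdec : (decide ((s : Int) + 1 < (X.length : Int))) = true := by
        simp only [decide_eq_true_eq]; exact_mod_cast hlt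
      simp only [List.countP_cons, List.tail_cons, List.zip_cons_cons, ihs, hz, hdec,
        Bool.true_and]
      cases hy : (y == (68:Int)) <;> cases hzl : (z == last) <;> simp

-- B's (dict, prev) fold over the tail equals the counter-building fold over the pair list.
theorem pv_bigram_fold (xs : List Int) :
    ∀ (prev : Int) (d : PySem.Dict (Int × Int) Int),
      (xs.foldl (fun (s : PySem.Dict (Int × Int) Int × Int) t =>
          (s.1.insert (s.2, t) (s.1.getD (s.2, t) 0 + 1), t)) (d, prev)).1
      = ((prev :: xs).zip xs).foldl (fun d p => d.insert p (d.getD p 0 + 1)) d := by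
  induction xs with
  | nil => intro prev d; rfl
  | cons x xs ih =>
    intro prev d
    simp only [List.foldl_cons, List.zip_cons_cons]
    cases xs with
    | nil => rfl
    | cons y ys => exact ih x _

-- Counting a literal pair key equals B-side predicate counting.
theorem pv_count_pair (l : List (Int × Int)) (last : Int) :
    l.count (68, last) = l.countP (fun p => p.1 == 68 && p.2 == last) := by
  rw [List.count_eq_countP]
  apply List.countP_congr
  intro p _
  cases p with
  | mk a b =>
    rw [show ((a, b) == ((68:Int), last)) = (a == 68 && b == last) from rfl]

-- One sequence: A's step function equals B's step function.
theorem pv_step (leak : Int) (seq : List Int) :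
    (let input_seq := PySem.List.slice seq none (some (-1))
     let target_seq := PySem.List.slice seq (some 1) none
     let sep_indices := ((PySem.List.enumerate input_seq).filter (fun p => p.2 == 68)).map (·.1)
     if sep_indices.isEmpty then leak
     else
       let last_token := PySem.List.pyGetD target_seq (-1) 0
       sep_indices.foldl (fun lc idx =>
         if idx + 1 < (input_seq.length : Int) then
           if PySem.List.pyGetD input_seq (idx + 1) 0 == last_token then lc + 1 else lc
         else lc) leak)
    = (if seq.length < 3 then leak
       else
         let inp := PySem.List.slice seq none (some (-1))
         let st := (PySem.List.slice inp (some 1) none).foldl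
             (fun (s : PySem.Dict (Int × Int) Int × Int) t =>
               (s.1.insert (s.2, t) (s.1.getD (s.2, t) 0 + 1), t))
             ((PySem.Dict.empty : PySem.Dict (Int × Int) Int), PySem.List.pyGetD inp 0 0)
         leak + st.1.getD (68, PySem.List.pyGetD seq (-1) 0) 0) := by
  simp only [PySem.List.slice_to_neg_one, PySem.List.slice_from_one]
  match seq with
  | [] => simp [PySem.List.enumerate_nil]
  | [x] => simp [PySem.List.enumerate_nil]
  | [x, y] =>
    -- input has one element, so every SEP index fails the idx+1 < 1 guard; B skips via len < 3
    have h2 : (([x, y] : List Int).length < 3) := by simp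
    rw [if_pos h2]
    have hdl : ([x, y] : List Int).dropLast = [x] := rfl
    rw [hdl]
    by_cases hx : (x == (68:Int)) = true
    · have he : ((PySem.List.enumerate ([x] : List Int)).filter
          (fun p => p.2 == 68)).map (·.1) = [(0:Int)] := by
        simp [PySem.List.enumerate_cons, PySem.List.enumerate_nil, hx]
      rw [he]
      simp
    · have he : ((PySem.List.enumerate ([x] : List Int)).filter
          (fun p => p.2 == 68)).map (·.1) = [] := by
        simp [PySem.List.enumerate_cons, PySem.List.enumerate_nil, hx]
      rw [he]
      simp
  | x :: y :: z :: t =>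
    have hlen : ¬ ((x :: y :: z :: t).length < 3) := by simp
    have hlast : PySem.List.pyGetD (y :: z :: t) (-1) 0
        = PySem.List.pyGetD (x :: y :: z :: t) (-1) 0 := by
      rw [PySem.List.pyGetD_neg_one (y :: z :: t) 0 (by simp),
        PySem.List.pyGetD_neg_one (x :: y :: z :: t) 0 (by simp)]
      exact (List.getLast_cons (by simp)).symm
    simp only [List.tail_cons]
    rw [if_neg hlen]
    have hXc : (x :: y :: z :: t).dropLast = x :: (y :: z :: t).dropLast := rfl
    rw [hXc]
    set M := (y :: z :: t).dropLast with hM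
    set X := x :: M with hX
    have hhead : PySem.List.pyGetD X 0 0 = x := by
      rw [show ((0:Int)) = ((0:Nat) : Int) from rfl, PySem.List.pyGetD_natCast, hX]
      simp
    have hBcount :
        ((X.tail.foldl
            (fun (s : PySem.Dict (Int × Int) Int × Int) t =>
              (s.1.insert (s.2, t) (s.1.getD (s.2, t) 0 + 1), t))
            ((PySem.Dict.empty : PySem.Dict (Int × Int) Int), PySem.List.pyGetD X 0 0)).1).getD
          (68, PySem.List.pyGetD (x :: y :: z :: t) (-1) 0) 0
        = ((X.zip X.tail).countP
            (fun p => p.1 == 68 && p.2 == PySem.List.pyGetD (x :: y :: z :: t) (-1) 0) : Int) := by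
      rw [hhead]
      have htail : X.tail = M := rfl
      rw [htail, pv_bigram_fold,
        show (x :: M).zip M = X.zip X.tail from rfl,
        PySem.Dict.foldl_insert_getD_add_one_eq_counter,
        PySem.Dict.getD_counter, pv_count_pair]
    rw [hBcount]
    by_cases hE : (((PySem.List.enumerate X).filter (fun p => p.2 == 68)).map (·.1)).isEmpty
    · rw [if_pos hE]
      have hnil : (PySem.List.enumerate X).filter (fun p => p.2 == 68) = [] := by
        have := List.isEmpty_iff.mp hE
        exact List.map_eq_nil_iff.mp this
      have hall := List.filter_eq_nil_iff.mp hnil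
      have hzero : (X.zip X.tail).countP
          (fun p => p.1 == 68 && p.2 == PySem.List.pyGetD (x :: y :: z :: t) (-1) 0) = 0 := by
        rw [← pv_key X (PySem.List.pyGetD (x :: y :: z :: t) (-1) 0) X 0 (by simp)]
        apply List.countP_eq_zero.mpr
        intro p hp
        have := hall p (by simpa using hp)
        simp_all
      simp [hzero]
    · rw [if_neg hE]
      simp only [hlast]
      rw [pv_foldl_nested]
      congr 1
      rw [List.countP_map, List.countP_filter,
        ← pv_key X (PySem.List.pyGetD (x :: y :: z :: t) (-1) 0) X 0 (by simp)]
      norm_num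

-- ===== VERDICT (by name: the statement is the Claim_ definition above) =====
theorem check_label_leakage_spec : Claim_equal_check_label_leakage := by
  intro seqs _
  unfold Spec_check_label_leakage check_label_leakage check_label_leakage_alt
  suffices h : ∀ (L : List (List Int)) (a : Int),
      L.foldl (fun leak_count seq =>
        let input_seq := PySem.List.slice seq none (some (-1))
        let target_seq := PySem.List.slice seq (some 1) none
        let sep_indices := ((PySem.List.enumerate input_seq).filter (fun p => p.2 == 68)).map (·.1)
        if sep_indices.isEmpty then leak_count
        else
          let last_token := PySem.List.pyGetD target_seq (-1) 0
          sep_indices.foldl (fun lc idx =>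
            if idx + 1 < (input_seq.length : Int) then
              if PySem.List.pyGetD input_seq (idx + 1) 0 == last_token then lc + 1 else lc
            else lc) leak_count) a
      = L.foldl (fun total seq =>
        if seq.length < 3 then total
        else
          let inp := PySem.List.slice seq none (some (-1))
          let st := (PySem.List.slice inp (some 1) none).foldl
              (fun (s : PySem.Dict (Int × Int) Int × Int) t =>
                (s.1.insert (s.2, t) (s.1.getD (s.2, t) 0 + 1), t))
              ((PySem.Dict.empty : PySem.Dict (Int × Int) Int), PySem.List.pyGetD inp 0 0)
          total + st.1.getD (68, PySem.List.pyGetD seq (-1) 0) 0) a by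
    exact h seqs 0
  intro L
  induction L with
  | nil => intro a; rfl
  | cons s L ih =>
    intro a
    rw [List.foldl_cons, List.foldl_cons, ih]
    congr 1
    exact pv_step a s
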